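-- pv_equiv track=rewrite | github.com/MPIfR-BDG/mpikat | mpikat/fbfuse_mcast_config.py | _valid_nbeams_per_group
-- ===== SOURCE A (Python) =====
-- def _valid_nbeams_per_group(max_nbeams_per_group, granularity):
--     valid = []
--     for ii in range(1, max_nbeams_per_group+1):
--         if (ii%granularity == 0) or (granularity%ii == 0):
--             valid.append(ii)
--     if not valid:
--         raise Exception("No valid beam counts for the selected granularity")
--     else:
--         return valid
-- ===== SOURCE B (Python) =====
-- def _valid_nbeams_per_group(max_nbeams_per_group, granularity):
--     if max_nbeams_per_group < 1 or granularity == 0: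
--         raise Exception("No valid beam counts for the selected granularity")
--     g = abs(granularity)
--     vals = set()
--     d = 1
--     while d * d <= g:
--         if g % d == 0:
--             if d <= max_nbeams_per_group:
--                 vals.add(d)
--             if g // d <= max_nbeams_per_group:
--                 vals.add(g // d)
--         d += 1
--     for m in range(g, max_nbeams_per_group + 1, g):
--         vals.add(m)
--     return sorted(vals)
-- ===== Notes on version B (the rewrite author's own statement) =====
-- stated objective: faster
-- what changed: Replaced the O(max) scan of 1..max with enumeration of granularity's divisors up to sqrt(|granularity|) plus a stepped range of its multiples, collected in a set and sorted.
import Mathlib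
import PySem

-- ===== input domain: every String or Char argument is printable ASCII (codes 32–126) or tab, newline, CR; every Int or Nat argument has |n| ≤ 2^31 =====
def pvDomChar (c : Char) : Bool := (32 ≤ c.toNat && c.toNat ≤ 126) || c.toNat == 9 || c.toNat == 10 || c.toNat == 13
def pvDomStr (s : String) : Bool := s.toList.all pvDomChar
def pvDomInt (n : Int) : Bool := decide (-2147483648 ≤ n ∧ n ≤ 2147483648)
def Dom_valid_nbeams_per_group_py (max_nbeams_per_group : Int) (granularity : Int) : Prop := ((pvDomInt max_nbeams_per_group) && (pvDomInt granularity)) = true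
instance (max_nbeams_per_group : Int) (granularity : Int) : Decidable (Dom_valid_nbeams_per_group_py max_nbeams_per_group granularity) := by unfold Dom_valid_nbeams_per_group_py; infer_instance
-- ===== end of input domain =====

-- B replaces A's O(max) scan by divisor enumeration up to sqrt(|granularity|) plus a stepped
-- range of multiples, collected in a set and sorted (objective: faster, asymptotic).

-- ===== PORT A =====
-- literal port of A's loop: for ii in range(1, max+1): if ii%g==0 or g%ii==0: valid.append(ii)
def valid_nbeams_per_group_py (max_nbeams_per_group : Int) (granularity : Int) : List Int :=
  (PySem.List.pyRange 1 (max_nbeams_per_group + 1) 1).foldl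
    (fun valid ii =>
      if PySem.Int.mod ii granularity == 0 || PySem.Int.mod granularity ii == 0 then
        valid ++ [ii]
      else valid) []

-- ===== PORT B =====
-- the `while d*d <= g` trial-division loop of Source B
def pvTrialDiv (max_nbeams_per_group g d : Int) (vals : PySem.Set Int) : PySem.Set Int :=
  if d * d ≤ g then
    pvTrialDiv max_nbeams_per_group g (d + 1)
      (if PySem.Int.mod g d == 0 then
        (let v1 := if d ≤ max_nbeams_per_group then PySem.Set.add vals d else vals
         if PySem.Int.floordiv g d ≤ max_nbeams_per_group then
           PySem.Set.add v1 (PySem.Int.floordiv g d)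
         else v1)
      else vals)
  else vals
termination_by (g + 1 - d).toNat
decreasing_by
  rename_i h
  have h1 : d * d + 1 ≥ 2 * d := by nlinarith [sq_nonneg (d - 1)]
  have h2 : 0 ≤ d * d := mul_self_nonneg d
  omega

def valid_nbeams_per_group_py_alt (max_nbeams_per_group : Int) (granularity : Int) : List Int :=
  if max_nbeams_per_group < 1 ∨ granularity = 0 then []   -- Source B raises here (outside Pre_)
  else
    let g := |granularity|
    let vals := pvTrialDiv max_nbeams_per_group g 1 ([] : PySem.Set Int)
    let vals2 := (PySem.List.pyRange g (max_nbeams_per_group + 1) g).foldl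
      (fun s m => PySem.Set.add s m) vals
    PySem.List.sorted vals2 (fun x => x)

-- ===== PRECONDITION & SPEC =====
-- Pre_ excludes exactly the inputs where A raises: granularity = 0 (ZeroDivisionError at ii % 0)
-- and max_nbeams_per_group < 1 (the list is empty and A raises Exception).
def Pre_valid_nbeams_per_group_py (max_nbeams_per_group : Int) (granularity : Int) : Prop :=
  granularity ≠ 0 ∧ 1 ≤ max_nbeams_per_group
instance (max_nbeams_per_group : Int) (granularity : Int) : Decidable (Pre_valid_nbeams_per_group_py max_nbeams_per_group granularity) := by unfold Pre_valid_nbeams_per_group_py; infer_instance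

def pvWitness_valid_nbeams_per_group_py : Int × Int := (6, 4)

def Spec_valid_nbeams_per_group_py (max_nbeams_per_group : Int) (granularity : Int) (out : List Int) : Prop := out = valid_nbeams_per_group_py_alt max_nbeams_per_group granularity
instance (max_nbeams_per_group : Int) (granularity : Int) (out : List Int) : Decidable (Spec_valid_nbeams_per_group_py max_nbeams_per_group granularity out) := by unfold Spec_valid_nbeams_per_group_py; infer_instance

-- ===== CLAIM (what is proved, stated in full; the proofs are below) =====
def Claim_equal_valid_nbeams_per_group_py : Prop := ∀ (max_nbeams_per_group : Int) (granularity : Int), Dom_valid_nbeams_per_group_py max_nbeams_per_group granularity → Pre_valid_nbeams_per_group_py max_nbeams_per_group granularity → Spec_valid_nbeams_per_group_py max_nbeams_per_group granularity (valid_nbeams_per_group_py max_nbeams_per_group granularity)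

-- ===== LEMMAS AND PROOFS =====

theorem pvExistsGeSplit (d : Int) (P : Int → Prop) :
    (∃ e, d ≤ e ∧ P e) ↔ P d ∨ ∃ e, d + 1 ≤ e ∧ P e := by
  constructor
  · rintro ⟨e, he, hp⟩
    rcases eq_or_lt_of_le he with rfl | hlt
    · exact Or.inl hp
    · exact Or.inr ⟨e, by omega, hp⟩
  · rintro (hp | ⟨e, he, hp⟩)
    · exact ⟨d, le_refl d, hp⟩
    · exact ⟨e, by omega, hp⟩

theorem pvMemTrialDiv (M g : Int) : ∀ (d : Int) (vals : PySem.Set Int) (x : Int), 1 ≤ d →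
    (x ∈ pvTrialDiv M g d vals ↔ x ∈ vals ∨ ∃ e, d ≤ e ∧ e * e ≤ g ∧ e ∣ g ∧
      ((x = e ∧ e ≤ M) ∨ (x = PySem.Int.floordiv g e ∧ PySem.Int.floordiv g e ≤ M))) := by
  intro d vals x
  fun_induction pvTrialDiv M g d vals with
  | case1 d vals h ih =>
    intro hd
    simp only [dite_eq_ite] at ih
    rw [ih (by omega), pvExistsGeSplit d _]
    by_cases hmod : (PySem.Int.mod g d == 0) = true
    · have hdvd : d ∣ g := by
        rw [← PySem.Int.mod_eq_zero_iff_dvd]; exact beq_iff_eq.mp hmod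
      by_cases hdM : d ≤ M <;> by_cases hfM : PySem.Int.floordiv g d ≤ M <;>
        simp only [hmod, hdM, hfM, if_true, if_false, PySem.Set.mem_add, h, hdvd,
          true_and, and_true] <;> simp [hdM, hfM, h, hdvd] <;> simp [or_assoc]
    · have hndvd : ¬ d ∣ g := by
        rw [← PySem.Int.mod_eq_zero_iff_dvd]
        intro hz; exact hmod (beq_iff_eq.mpr hz)
      simp only [hmod, if_false]
      simp [hndvd]
  | case2 d vals h =>
    intro hd
    constructor
    · intro hx; exact Or.inl hx
    · rintro (hx | ⟨e, hde, hee, _, _⟩)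
      · exact hx
      · exfalso; nlinarith

theorem pvNodupTrialDiv (M g : Int) : ∀ (d : Int) (vals : PySem.Set Int),
    vals.Nodup → (pvTrialDiv M g d vals).Nodup := by
  intro d vals
  fun_induction pvTrialDiv M g d vals with
  | case1 d vals h ih =>
    intro hn
    apply ih
    by_cases hmod : (PySem.Int.mod g d == 0) = true <;>
      by_cases hdM : d ≤ M <;> by_cases hfM : PySem.Int.floordiv g d ≤ M <;>
      simp only [hmod, hdM, hfM, if_true, if_false] <;>
      first
        | exact hn
        | exact PySem.Set.nodup_add _ _ hn
        | exact PySem.Set.nodup_add _ _ (PySem.Set.nodup_add _ _ hn)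
  | case2 d vals h => intro hn; exact hn

theorem pvDivisorHit (g x M : Int) (hg : 1 ≤ g) (hx1 : 1 ≤ x) (hxM : x ≤ M) (hdvd : x ∣ g) :
    ∃ e, 1 ≤ e ∧ e * e ≤ g ∧ e ∣ g ∧
      ((x = e ∧ e ≤ M) ∨ (x = PySem.Int.floordiv g e ∧ PySem.Int.floordiv g e ≤ M)) := by
  by_cases hxx : x * x ≤ g
  · exact ⟨x, hx1, hxx, hdvd, Or.inl ⟨rfl, hxM⟩⟩
  · obtain ⟨e, he⟩ := id hdvd
    have he1 : 1 ≤ e := by nlinarith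
    have hee : e * e ≤ g := by nlinarith
    have hedvd : e ∣ g := ⟨x, by rw [he]; ring⟩
    have hfd : PySem.Int.floordiv g e = x := by
      rw [PySem.Int.floordiv_eq_ediv_of_pos (by omega), he, mul_comm]
      exact Int.mul_ediv_cancel_left x (by omega)
    exact ⟨e, he1, hee, hedvd, Or.inr ⟨hfd.symm, by rw [hfd]; exact hxM⟩⟩

theorem pvMemVals2 (M gr : Int) (hgr : gr ≠ 0) (hM : 1 ≤ M) (x : Int) :
    (x ∈ (PySem.List.pyRange |gr| (M + 1) |gr|).foldl (fun s m => PySem.Set.add s m)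
          (pvTrialDiv M |gr| 1 ([] : PySem.Set Int)) ↔
      1 ≤ x ∧ x < M + 1 ∧ (gr ∣ x ∨ x ∣ gr)) := by
  have habs : 1 ≤ |gr| := Int.one_le_abs (by omega)
  rw [PySem.Set.mem_foldl_add]
  rw [pvMemTrialDiv M |gr| 1 _ x le_rfl]
  constructor
  · rintro ((h0 | ⟨e, he1, hee, hedvd, hbr⟩) | ⟨b, hb, rfl⟩)
    · simp at h0
    · have heg : e ≤ |gr| := by nlinarith
      rcases hbr with ⟨rfl, heM⟩ | ⟨rfl, hfM⟩
      · exact ⟨he1, by omega, Or.inr ((dvd_abs _ _).mp hedvd)⟩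
      · rw [PySem.Int.floordiv_eq_ediv_of_pos (by omega)]
        obtain ⟨c, hc⟩ := id hedvd
        have hce : |gr| / e = c := by rw [hc]; exact Int.mul_ediv_cancel_left c (by omega)
        have hdvd2 : |gr| / e ∣ |gr| := by rw [hce]; exact ⟨e, by rw [hc]; ring⟩
        have h1 : 1 ≤ |gr| / e := by rw [hce]; nlinarith
        refine ⟨h1, ?_, Or.inr ((dvd_abs _ _).mp hdvd2)⟩
        rw [PySem.Int.floordiv_eq_ediv_of_pos (by omega)] at hfM
        omega
    · rw [PySem.List.mem_pyRange_iff_of_pos (by omega)] at hb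
      obtain ⟨hb1, hb2, hb3⟩ := hb
      have hbd : |gr| ∣ x := by simpa using dvd_add hb3 (dvd_refl |gr|)
      exact ⟨by omega, hb2, Or.inl ((abs_dvd _ _).mp hbd)⟩
  · rintro ⟨hx1, hxlt, hdvd | hdvd⟩
    · refine Or.inr ⟨x, ?_, rfl⟩
      rw [PySem.List.mem_pyRange_iff_of_pos (by omega)]
      have habsd : |gr| ∣ x := (abs_dvd _ _).mpr hdvd
      have : |gr| ≤ x := Int.le_of_dvd (by omega) habsd
      exact ⟨this, hxlt, dvd_sub habsd dvd_rfl⟩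
    · obtain ⟨e, he1, hee, hedvd, hbr⟩ :=
        pvDivisorHit |gr| x M habs hx1 (by omega) ((dvd_abs _ _).mpr hdvd)
      exact Or.inl (Or.inr ⟨e, he1, hee, hedvd, hbr⟩)

theorem pvMainEq (m g : Int) (hg : g ≠ 0) (hm : 1 ≤ m) :
    valid_nbeams_per_group_py m g = valid_nbeams_per_group_py_alt m g := by
  unfold valid_nbeams_per_group_py valid_nbeams_per_group_py_alt
  rw [PySem.List.foldl_append_if_eq_filter]
  rw [if_neg (show ¬(m < 1 ∨ g = 0) by omega)]
  simp only [List.nil_append]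
  have hnodupF : ((PySem.List.pyRange 1 (m + 1) 1).filter
      (fun ii => PySem.Int.mod ii g == 0 || PySem.Int.mod g ii == 0)).Nodup :=
    (PySem.List.nodup_pyRange_one 1 (m + 1)).filter _
  have hpair : ((PySem.List.pyRange 1 (m + 1) 1).filter
      (fun ii => PySem.Int.mod ii g == 0 || PySem.Int.mod g ii == 0)).Pairwise
        (fun a b => (fun x => x) a < (fun x => x) b) :=
    (PySem.List.pairwise_lt_pyRange_one 1 (m + 1)).filter _
  have hnodupV : ((PySem.List.pyRange |g| (m + 1) |g|).foldl
      (fun s x => PySem.Set.add s x) (pvTrialDiv m |g| 1 ([] : PySem.Set Int))).Nodup :=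
    PySem.Set.nodup_update _ _ (pvNodupTrialDiv m |g| 1 [] List.nodup_nil)
  have hperm : ((PySem.List.pyRange 1 (m + 1) 1).filter
      (fun ii => PySem.Int.mod ii g == 0 || PySem.Int.mod g ii == 0)).Perm
      ((PySem.List.pyRange |g| (m + 1) |g|).foldl
        (fun s x => PySem.Set.add s x) (pvTrialDiv m |g| 1 ([] : PySem.Set Int))) := by
    rw [List.perm_ext_iff_of_nodup hnodupF hnodupV]
    intro a
    rw [pvMemVals2 m g hg hm a]
    simp only [List.mem_filter, PySem.List.mem_pyRange_one, Bool.or_eq_true, beq_iff_eq,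
      PySem.Int.mod_eq_zero_iff_dvd]
    tauto
  exact (PySem.List.sorted_eq_of_perm_of_pairwise_lt _ _ _ hperm hpair).symm

-- ===== VERDICT (by name: the statement is the Claim_ definition above) =====
theorem valid_nbeams_per_group_py_spec : Claim_equal_valid_nbeams_per_group_py := by
  intro m g _ hpre
  unfold Spec_valid_nbeams_per_group_py
  exact pvMainEq m g hpre.1 hpre.2
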